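-- pv_equiv track=rewrite | github.com/LazyyMonster/LeetCode | 1813. Sentence Similarity III.py | areSentencesSimilar
-- ===== SOURCE A (Python) =====
-- def areSentencesSimilar(sentence1: str, sentence2: str) -> bool:
--     if sentence1 == sentence2:
--         return True
--
--     if len(sentence1) == len(sentence2):
--         return False
--
--     arr1 = sentence1.split(" ")
--     arr2 = sentence2.split(" ")
--     arr1Len = len(arr1)
--     arr2Len = len(arr2)
--     if arr1Len < arr2Len:
--         if arr2[:arr1Len] == arr1:
--             return True
--         if arr2[-arr1Len:] == arr1:
--             return True
--         if arr1[0] != arr2[0] or arr1[-1] != arr2[-1]: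
--             return False
--
--         if arr1[0] == arr2[0] and arr1[-1] == arr2[-1]:
--             for c, w in enumerate(arr1):
--                 if w != arr2[c]:
--                     break
--         if arr1[c:] == arr2[-(arr1Len - c):]:
--             return True
--
--     else:
--         if arr1[:arr2Len] == arr2:
--             return True
--         if arr1[-arr2Len:] == arr2:
--             return True
--         if arr1[0] != arr2[0] or arr1[-1] != arr2[-1]:
--             return False
--
--         if arr1[0] == arr2[0] and arr1[-1] == arr2[-1]:
--             for c, w in enumerate(arr2):
--                 if w != arr1[c]:
--                     break
--         if arr2[c:] == arr1[-(arr2Len - c):]: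
--             return True
--
--     return False
-- ===== SOURCE B (Python) =====
-- def areSentencesSimilar(sentence1: str, sentence2: str) -> bool:
--     w1 = sentence1.split(" ")
--     w2 = sentence2.split(" ")
--     if len(w1) > len(w2):
--         w1, w2 = w2, w1
--     i = 0
--     while i < len(w1) and w1[i] == w2[i]:
--         i += 1
--     j = 0
--     while j < len(w1) - i and w1[len(w1) - 1 - j] == w2[len(w2) - 1 - j]:
--         j += 1
--     return i + j >= len(w1)
-- ===== Notes on version B (the rewrite author's own statement) =====
-- stated objective: idiomatic
-- what changed: A's cascade of slice-equality tests (prefix slice, suffix slice, first/last word checks, enumerate/break mismatch loop) is replaced by one bidirectional two-pointer scan: count matching words from the front, then from the back, and test prefix+suffix >= len of the shorter word list.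
import Mathlib
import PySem

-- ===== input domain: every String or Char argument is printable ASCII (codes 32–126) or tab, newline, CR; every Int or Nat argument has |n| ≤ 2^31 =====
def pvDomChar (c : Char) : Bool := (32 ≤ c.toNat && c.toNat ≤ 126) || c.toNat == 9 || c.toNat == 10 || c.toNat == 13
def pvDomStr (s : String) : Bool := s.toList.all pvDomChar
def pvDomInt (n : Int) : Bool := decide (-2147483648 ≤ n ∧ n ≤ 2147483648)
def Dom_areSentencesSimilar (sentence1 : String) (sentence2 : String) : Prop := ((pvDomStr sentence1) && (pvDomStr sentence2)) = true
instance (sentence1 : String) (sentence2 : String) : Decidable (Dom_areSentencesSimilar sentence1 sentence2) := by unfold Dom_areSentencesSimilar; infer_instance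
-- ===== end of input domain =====

-- B replaces A's slice-equality tests and enumerate/break loop by a single bidirectional
-- two-pointer scan (prefix match count + suffix match count); objective: idiomatic/alternative.

-- ===== PORT A =====
-- the `for c, w in enumerate(arr1): if w != arr2[c]: break` loop: returns the value the loop
-- variable c has after the break (first mismatch index) or after a full run (last index).
-- `arr2[c]` is in range at every call site (c < len of the shorter list), so `getD` is exact;
-- the [] start case (Python's c would be undefined) is unreachable: split(" ") is never empty.
def pyFindC (a b : List String) (c : Nat) : Nat :=
  match a with
  | [] => c - 1
  | w :: rest => if w ≠ b.getD c "" then c else pyFindC rest b (c + 1)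

-- body of A's `if arr1Len < arr2Len` branch with s = arr1, l = arr2; A's `else` branch is the
-- same code with the two arrays (and their lengths) exchanged, so it is pyBranch arr2 arr1.
-- Python would raise NameError if the `for` loop never ran; here the loop's guard
-- `arr1[0] == arr2[0] and arr1[-1] == arr2[-1]` is exactly the negation of the test that has
-- just returned False, so the loop always runs and c is always defined.
def pyBranch (s l : List String) : Bool :=
  if PySem.List.slice l none (some (s.length : Int)) = s then true
  else if PySem.List.slice l (some (-(s.length : Int))) none = s then true
  else if PySem.List.pyGet? s 0 ≠ PySem.List.pyGet? l 0 ∨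
          PySem.List.pyGet? s (-1) ≠ PySem.List.pyGet? l (-1) then false
  else
    let c := pyFindC s l 0
    if PySem.List.slice s (some (c : Int)) none
        = PySem.List.slice l (some (-((s.length : Int) - (c : Int)))) none then true
    else false

-- sep " " is nonempty, so split? always returns `some`; getD [] is exact.
def areSentencesSimilar (sentence1 : String) (sentence2 : String) : Bool :=
  if sentence1 = sentence2 then true
  else if PySem.Str.len sentence1 = PySem.Str.len sentence2 then false
  else
    let arr1 := (PySem.Str.split? sentence1 " ").getD []
    let arr2 := (PySem.Str.split? sentence2 " ").getD []
    if arr1.length < arr2.length then pyBranch arr1 arr2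
    else pyBranch arr2 arr1

-- ===== PORT B =====
-- `while i < len(w1) and w1[i] == w2[i]: i += 1` — all indices are in range (i < len w1 ≤ len w2),
-- so getD is exact.
def altPref (w1 w2 : List String) (i : Nat) : Nat :=
  if i < w1.length ∧ w1.getD i "" = w2.getD i "" then altPref w1 w2 (i + 1) else i
termination_by w1.length - i
decreasing_by omega

-- `while j < len(w1) - i and w1[len(w1)-1-j] == w2[len(w2)-1-j]: j += 1`
def altSuf (w1 w2 : List String) (i j : Nat) : Nat :=
  if j < w1.length - i ∧ w1.getD (w1.length - 1 - j) "" = w2.getD (w2.length - 1 - j) ""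
  then altSuf w1 w2 i (j + 1) else j
termination_by w1.length - i - j
decreasing_by omega

def altCore (w1 w2 : List String) : Bool :=
  let i := altPref w1 w2 0
  let j := altSuf w1 w2 i 0
  decide (w1.length ≤ i + j)

def areSentencesSimilar_alt (sentence1 : String) (sentence2 : String) : Bool :=
  let a1 := (PySem.Str.split? sentence1 " ").getD []
  let a2 := (PySem.Str.split? sentence2 " ").getD []
  if a2.length < a1.length then altCore a2 a1 else altCore a1 a2

-- ===== PRECONDITION & SPEC =====
def Spec_areSentencesSimilar (sentence1 : String) (sentence2 : String) (out : Bool) : Prop := out = areSentencesSimilar_alt sentence1 sentence2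
instance (sentence1 : String) (sentence2 : String) (out : Bool) : Decidable (Spec_areSentencesSimilar sentence1 sentence2 out) := by unfold Spec_areSentencesSimilar; infer_instance

-- ===== CLAIM (what is proved, stated in full; the proofs are below) =====
def Claim_equal_areSentencesSimilar : Prop := ∀ (sentence1 : String) (sentence2 : String), Dom_areSentencesSimilar sentence1 sentence2 → Spec_areSentencesSimilar sentence1 sentence2 (areSentencesSimilar sentence1 sentence2)

-- ===== LEMMAS AND PROOFS =====

-- ---- char-level model of str.split(" ") ----
def mySplit (cur : List Char) : List Char → List (List Char)
  | [] => [cur]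
  | c :: rest => if c = ' ' then cur :: mySplit [] rest else mySplit (cur ++ [c]) rest

lemma go_eq (l : List Char) : ∀ (fuel : Nat) (cur : List Char) (acc2 : List (List Char)),
    l.length < fuel →
    PySem.Chars.splitOn.go [' '] fuel l cur acc2 = acc2.reverse ++ mySplit cur.reverse l := by
  induction l with
  | nil =>
    intro fuel cur acc2 h
    match fuel with
    | f + 1 => simp [PySem.Chars.splitOn.go, mySplit]
  | cons c rest ih =>
    intro fuel cur acc2 h
    match fuel with
    | f + 1 =>
      rw [PySem.Chars.splitOn.go]
      by_cases hc : c = ' '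
      · subst hc
        rw [if_pos (by simp [List.isPrefixOf])]
        rw [show List.drop [' '].length (' ' :: rest) = rest from rfl]
        rw [ih f [] (cur.reverse :: acc2) (by simpa using h)]
        simp [mySplit]
      · rw [if_neg (by simp [List.isPrefixOf]; intro hh; exact absurd hh.symm (by simpa using hc))]
        rw [ih f (c :: cur) acc2 (by simpa using h)]
        simp [mySplit, hc]

lemma mySplit_ne_nil (cur l : List Char) : mySplit cur l ≠ [] := by
  induction l generalizing cur with
  | nil => simp [mySplit]
  | cons c rest ih => by_cases h : c = ' ' <;> simp [mySplit, h, ih]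

lemma join_mySplit (cur l : List Char) :
    PySem.Chars.join [' '] (mySplit cur l) = cur ++ l := by
  induction l generalizing cur with
  | nil => simp [mySplit, PySem.Chars.join_singleton]
  | cons c rest ih =>
    by_cases h : c = ' '
    · subst h
      obtain ⟨x, t, hx⟩ : ∃ x t, mySplit ([] : List Char) rest = x :: t := by
        cases hh : mySplit ([] : List Char) rest with
        | nil => exact absurd hh (mySplit_ne_nil _ _)
        | cons x t => exact ⟨x, t, rfl⟩
      have hms : mySplit cur (' ' :: rest) = cur :: mySplit [] rest := by simp [mySplit]
      rw [hms, hx, PySem.Chars.join_cons_cons, ← hx, ih]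
      simp
    · simp only [mySplit, if_neg h]
      rw [ih]
      simp

def sumLen (L : List (List Char)) : Nat := (L.map List.length).sum

lemma len_join (L : List (List Char)) (h : L ≠ []) :
    (PySem.Chars.join [' '] L).length + 1 = sumLen L + L.length := by
  induction L with
  | nil => simp at h
  | cons x rest ih =>
    cases rest with
    | nil => simp [PySem.Chars.join_singleton, sumLen]
    | cons y r =>
      rw [PySem.Chars.join_cons_cons]
      have h2 := ih (by simp)
      simp only [sumLen, List.map_cons, List.sum_cons, List.length_cons, List.length_append,
        List.length_nil] at *
      omega

-- ---- String-level facts about splitS ----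
-- the word list the ports' split produces, at String level
def splitS (s : String) : List String := (PySem.Str.split? s " ").getD []

lemma splitS_eq (s : String) : splitS s = (mySplit [] s.toList).map String.ofList := by
  rw [splitS, PySem.Str.split?]
  rw [show (" ").toList = [' '] from rfl]
  rw [PySem.Chars.split?, if_neg (by simp)]
  rw [PySem.Chars.splitOn]
  rw [go_eq s.toList (s.toList.length + 1) [] [] (by omega)]
  simp

lemma splitS_ne_nil (s : String) : splitS s ≠ [] := by
  rw [splitS_eq]
  simp [mySplit_ne_nil]

lemma splitS_toList (s : String) : (splitS s).map String.toList = mySplit [] s.toList := by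
  rw [splitS_eq]
  simp [Function.comp_def]

lemma splitS_inj {s t : String} (h : splitS s = splitS t) : s = t := by
  have h2 : mySplit [] s.toList = mySplit [] t.toList := by
    rw [← splitS_toList, ← splitS_toList, h]
  have h3 := join_mySplit [] s.toList
  rw [h2, join_mySplit] at h3
  simp only [List.nil_append] at h3
  exact (String.toList_inj.mp h3).symm

lemma splitS_len (s : String) :
    s.toList.length + 1 = sumLen ((splitS s).map String.toList) + (splitS s).length := by
  have h2 := len_join (mySplit [] s.toList) (mySplit_ne_nil _ _)
  rw [join_mySplit] at h2
  simp only [List.nil_append] at h2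
  rw [splitS_toList]
  have h3 : (splitS s).length = (mySplit [] s.toList).length := by
    rw [splitS_eq]; simp
  omega

-- ---- small index helpers ----
lemma getD_of_lt {l : List String} {i : Nat} (h : i < l.length) :
    l[i]? = some (l.getD i "") := by
  simp [List.getD_eq_getElem?_getD, List.getElem?_eq_getElem h]

lemma pyGet_zero (l : List String) : PySem.List.pyGet? l 0 = l[0]? := by
  simpa using PySem.List.pyGet?_natCast l 0

lemma pyGet_neg_one (l : List String) (h : l ≠ []) :
    PySem.List.pyGet? l (-1) = l[l.length - 1]? := by
  have hl : 1 ≤ l.length := List.length_pos_iff.mpr h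
  simp only [PySem.List.pyGet?, PySem.List.pyIdx?]
  rw [if_neg (by omega), if_pos (by omega)]
  simp

lemma slice_neg_from (l : List String) (n : Nat) (h0 : 0 < n) (h : n ≤ l.length) :
    PySem.List.slice l (some (-(n : Int))) none = l.drop (l.length - n) := by
  simp only [PySem.List.slice, PySem.List.clampIdx]
  rw [if_pos (by omega), if_neg (by omega)]
  rw [show ((l.length : Int) + -(n : Int)).toNat = l.length - n from by omega]
  rw [show l.length - (l.length - n) = n from by omega]
  apply List.take_of_length_le
  simp only [List.length_drop]
  omega

-- ---- characterisation of B's two loops ----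
lemma altPref_spec (w1 w2 : List String) (hw : w1.length ≤ w2.length) :
    ∀ (i : Nat), i ≤ w1.length →
    i ≤ altPref w1 w2 i ∧ altPref w1 w2 i ≤ w1.length ∧
    (∀ k, i ≤ k → k < altPref w1 w2 i → w1[k]? = w2[k]?) ∧
    (altPref w1 w2 i < w1.length → w1[altPref w1 w2 i]? ≠ w2[altPref w1 w2 i]?) := by
  intro i
  induction' hd : w1.length - i with d ih generalizing i
  case zero =>
    intro hi
    have hin : i = w1.length := by omega
    rw [altPref, if_neg (by omega)]
    refine ⟨le_refl _, by omega, by omega, by omega⟩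
  case succ =>
    intro hi
    by_cases hc : i < w1.length ∧ w1.getD i "" = w2.getD i ""
    · rw [altPref, if_pos hc]
      obtain ⟨h1, h2, h3, h4⟩ := ih (i + 1) (by omega) (by omega)
      refine ⟨by omega, h2, ?_, h4⟩
      intro k hk1 hk2
      rcases Nat.eq_or_lt_of_le hk1 with he | hlt
      · subst he
        rw [getD_of_lt hc.1, getD_of_lt (by omega), hc.2]
      · exact h3 k hlt hk2
    · rw [altPref, if_neg hc]
      refine ⟨le_refl _, hi, by omega, ?_⟩
      intro hin
      rw [getD_of_lt hin, getD_of_lt (by omega)]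
      intro hcon
      exact hc ⟨hin, by simpa using hcon⟩

lemma altSuf_spec (w1 w2 : List String) (i : Nat) (hi : i ≤ w1.length)
    (hw : w1.length ≤ w2.length) :
    ∀ (j : Nat), j ≤ w1.length - i →
    j ≤ altSuf w1 w2 i j ∧ altSuf w1 w2 i j ≤ w1.length - i ∧
    (∀ k, j ≤ k → k < altSuf w1 w2 i j → w1[w1.length - 1 - k]? = w2[w2.length - 1 - k]?) ∧
    (altSuf w1 w2 i j < w1.length - i →
      w1[w1.length - 1 - altSuf w1 w2 i j]? ≠ w2[w2.length - 1 - altSuf w1 w2 i j]?) := by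
  intro j
  induction' hd : w1.length - i - j with d ih generalizing j
  case zero =>
    intro hj
    rw [altSuf, if_neg (by omega)]
    refine ⟨le_refl _, by omega, by omega, by omega⟩
  case succ =>
    intro hj
    by_cases hc : j < w1.length - i ∧
        w1.getD (w1.length - 1 - j) "" = w2.getD (w2.length - 1 - j) ""
    · rw [altSuf, if_pos hc]
      obtain ⟨h1, h2, h3, h4⟩ := ih (j + 1) (by omega) (by omega)
      refine ⟨by omega, h2, ?_, h4⟩
      intro k hk1 hk2
      rcases Nat.eq_or_lt_of_le hk1 with he | hlt
      · subst he
        rw [getD_of_lt (by omega), getD_of_lt (by omega), hc.2]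
      · exact h3 k hlt hk2
    · rw [altSuf, if_neg hc]
      refine ⟨le_refl _, hj, by omega, ?_⟩
      intro hjn
      rw [getD_of_lt (by omega), getD_of_lt (by omega)]
      intro hcon
      exact hc ⟨hjn, by simpa using hcon⟩

lemma altCore_true_iff (w1 w2 : List String) (hw : w1.length ≤ w2.length) :
    (altCore w1 w2 = true ↔
      w1.drop (altPref w1 w2 0) = w2.drop (w2.length - w1.length + altPref w1 w2 0)) := by
  obtain ⟨-, hile, hpre, -⟩ := altPref_spec w1 w2 hw 0 (by omega)
  set i := altPref w1 w2 0 with hidef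
  obtain ⟨-, hjle, hsuf, hsne⟩ := altSuf_spec w1 w2 i hile hw 0 (by omega)
  set j := altSuf w1 w2 i 0 with hjdef
  rw [altCore]
  simp only [← hidef, ← hjdef, decide_eq_true_eq]
  constructor
  · intro hn
    have hj : j = w1.length - i := by omega
    apply List.ext_getElem?
    intro t
    by_cases ht : t < w1.length - i
    · rw [List.getElem?_drop, List.getElem?_drop]
      have := hsuf (w1.length - i - 1 - t) (by omega) (by omega)
      have e1 : w1.length - 1 - (w1.length - i - 1 - t) = i + t := by omega
      have e2 : w2.length - 1 - (w1.length - i - 1 - t) = w2.length - w1.length + i + t := by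
        omega
      rw [e1, e2] at this
      rw [this]
    · rw [List.getElem?_eq_none (by simp; omega), List.getElem?_eq_none (by simp; omega)]
  · intro hdrop
    by_contra hn
    have hj : j < w1.length - i := by omega
    have hne := hsne hj
    apply hne
    have h1 : w1[w1.length - 1 - j]? = (w1.drop i)[w1.length - 1 - j - i]? := by
      rw [List.getElem?_drop]; congr 1; omega
    have h2 : w2[w2.length - 1 - j]? =
        (w2.drop (w2.length - w1.length + i))[w1.length - 1 - j - i]? := by
      rw [List.getElem?_drop]; congr 1; omega
    rw [h1, h2, hdrop]

-- take-prefix consequences of altPref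
lemma take_eq_of_pointwise (a b : List String) (i : Nat)
    (h : ∀ k, k < i → a[k]? = b[k]?) : a.take i = b.take i := by
  apply List.ext_getElem?
  intro t
  by_cases ht : t < i
  · rw [List.getElem?_take_of_lt ht, List.getElem?_take_of_lt ht, h t ht]
  · rw [List.getElem?_eq_none (by simp; omega), List.getElem?_eq_none (by simp; omega)]

lemma splitS_def (s : String) : (PySem.Str.split? s " ").getD [] = splitS s := rfl

lemma altPref_eq_length_iff (a b : List String) (hw : a.length ≤ b.length) :
    altPref a b 0 = a.length ↔ b.take a.length = a := by
  obtain ⟨-, hile, hpre, hmis⟩ := altPref_spec a b hw 0 (by omega)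
  constructor
  · intro hi
    have := take_eq_of_pointwise a b (altPref a b 0) (fun k hk => hpre k (by omega) hk)
    rw [hi] at this
    rw [← this, List.take_of_length_le (le_refl _ |>.trans (by omega))]
  · intro ht
    by_contra hne
    have hlt : altPref a b 0 < a.length := by omega
    apply hmis hlt
    have : a[altPref a b 0]? = (b.take a.length)[altPref a b 0]? := by rw [ht]
    rw [List.getElem?_take_of_lt hlt] at this
    exact this

-- pyFindC returns the first mismatch index
lemma pyFindC_eq_gen (a b : List String) : ∀ (c p : Nat), p < a.length →
    c + a.length ≤ b.length →
    (∀ k, k < p → a[k]? = b[c + k]?) → a[p]? ≠ b[c + p]? → pyFindC a b c = c + p := by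
  induction a with
  | nil => intro c p hp; simp at hp
  | cons x rest ih =>
    intro c p hp hlen hpre hne
    match p with
    | 0 =>
      have hx : x ≠ b.getD c "" := by
        intro he
        apply hne
        rw [show (x :: rest)[0]? = some x from rfl, getD_of_lt (l := b) (by simp at hlen; omega)]
        simpa using he
      rw [pyFindC, if_pos hx]
      omega
    | q + 1 =>
      have hx : ¬ (x ≠ b.getD c "") := by
        have h0 := hpre 0 (by omega)
        rw [show (x :: rest)[0]? = some x from rfl, getD_of_lt (l := b) (by simp at hlen; omega)]
          at h0
        simp only [ne_eq, not_not]
        simpa using h0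
      rw [pyFindC, if_neg hx]
      have := ih (c + 1) q (by simpa using hp) (by simp at hlen; omega)
        (fun k hk => by
          have := hpre (k + 1) (by omega)
          rw [show (x :: rest)[k + 1]? = rest[k]? from rfl] at this
          rw [this]; congr 1; omega)
        (by
          rw [show rest[q]? = (x :: rest)[q + 1]? from rfl]
          have : c + 1 + q = c + (q + 1) := by omega
          rw [this]
          exact hne)
      rw [this]
      omega

-- ---- the main branch equivalence (shorter list s, longer l) ----
lemma branch_equiv (a b : List String) (ha : a ≠ []) (hlt : a.length < b.length) :
    pyBranch a b = altCore a b := by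
  have hle : a.length ≤ b.length := by omega
  have hapos : 0 < a.length := List.length_pos_iff.mpr ha
  obtain ⟨-, hile, hpre, hmis⟩ := altPref_spec a b hle 0 (by omega)
  set i := altPref a b 0 with hidef
  have hiff := altCore_true_iff a b hle
  rw [← hidef] at hiff
  rw [pyBranch]
  rw [PySem.List.slice_to b (b := (a.length : Int)) (by positivity)]
  rw [show ((a.length : Int)).toNat = a.length from by omega]
  rw [slice_neg_from b a.length hapos (by omega)]
  by_cases h1 : b.take a.length = a
  · rw [if_pos h1]
    have hi : i = a.length := (altPref_eq_length_iff a b hle).mpr h1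
    symm
    rw [hiff, hi]
    rw [List.drop_of_length_le (le_refl _)]
    exact (List.drop_of_length_le (by omega)).symm
  · rw [if_neg h1]
    have hi : i < a.length := by
      rcases Nat.lt_or_ge i a.length with h | h
      · exact h
      · exact absurd ((altPref_eq_length_iff a b hle).mp (by omega)) h1
    by_cases h2 : b.drop (b.length - a.length) = a
    · rw [if_pos h2]
      symm
      rw [hiff]
      have : b.drop (b.length - a.length + i) = (b.drop (b.length - a.length)).drop i := by
        rw [List.drop_drop]
      rw [this]
      rw [h2]

    · rw [if_neg h2]
      -- heads / lasts
      by_cases h3 : PySem.List.pyGet? a 0 ≠ PySem.List.pyGet? b 0 ∨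
          PySem.List.pyGet? a (-1) ≠ PySem.List.pyGet? b (-1)
      · rw [if_pos h3]
        symm
        rw [Bool.eq_false_iff]
        intro hc
        rw [hiff] at hc
        -- derive head and last equality, contradicting h3
        have hhead : a[0]? = b[0]? := by
          rcases Nat.eq_zero_or_pos i with h0 | h0
          · rw [h0] at hc
            simp only [List.drop_zero, Nat.add_zero] at hc
            exact absurd hc.symm h2
          · exact hpre 0 (by omega) (by omega)
        have hlast : a[a.length - 1]? = b[b.length - 1]? := by
          have t1 : a[a.length - 1]? = (a.drop i)[a.length - 1 - i]? := by
            rw [List.getElem?_drop]; congr 1; omega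
          have t2 : b[b.length - 1]? =
              (b.drop (b.length - a.length + i))[a.length - 1 - i]? := by
            rw [List.getElem?_drop]; congr 1; omega
          rw [t1, t2, hc]
        rw [pyGet_zero a, pyGet_zero b, pyGet_neg_one a ha,
          pyGet_neg_one b (by intro hb; rw [hb] at hlt; simp at hlt)] at h3
        rcases h3 with h3 | h3
        · exact h3 hhead
        · exact h3 hlast
      · rw [if_neg h3]
        -- c = i
        have hc : pyFindC a b 0 = i := by
          have := pyFindC_eq_gen a b 0 i hi (by omega)
            (fun k hk => by simpa using hpre k (by omega) hk)
            (by simpa using hmis hi)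
          simpa using this
        simp only [hc]
        rw [PySem.List.slice_from a (a := (i : Int)) (by positivity)]
        rw [show ((i : Int)).toNat = i from by omega]
        have hnc : -((a.length : Int) - (i : Int)) = -((a.length - i : Nat) : Int) := by
          omega
        rw [hnc, slice_neg_from b (a.length - i) (by omega) (by omega)]
        have : b.length - (a.length - i) = b.length - a.length + i := by omega
        rw [this]
        by_cases hfin : a.drop i = b.drop (b.length - a.length + i)
        · rw [if_pos hfin]
          symm
          rw [hiff]
          exact hfin
        · rw [if_neg hfin]
          symm
          rw [Bool.eq_false_iff]
          intro hcon
          exact hfin (hiff.mp hcon)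

-- ---- equal word counts, different word lists: both sides are false ----
lemma eqlen_case (a b : List String) (hne : a ≠ b) (hl : a.length = b.length) (ha : a ≠ []) :
    pyBranch b a = false ∧ altCore a b = false := by
  have hapos : 0 < a.length := List.length_pos_iff.mpr ha
  obtain ⟨-, hile, hpre, hmis⟩ := altPref_spec a b (by omega) 0 (by omega)
  set i := altPref a b 0 with hidef
  have hiff := altCore_true_iff a b (by omega)
  rw [← hidef] at hiff
  have hi : i < a.length := by
    rcases Nat.lt_or_ge i a.length with h | h
    · exact h
    · exfalso
      have hieq : i = a.length := by omega
      have := take_eq_of_pointwise a b i (fun k hk => hpre k (by omega) hk)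
      rw [hieq, List.take_of_length_le (le_refl _), List.take_of_length_le (by omega)] at this
      exact hne this
  have haltf : altCore a b = false := by
    rw [Bool.eq_false_iff]
    intro hc
    rw [hiff] at hc
    apply hmis hi
    have t1 : a[i]? = (a.drop i)[0]? := by rw [List.getElem?_drop]; norm_num
    have t2 : b[i]? = (b.drop (b.length - a.length + i))[0]? := by
      rw [List.getElem?_drop]; congr 1; omega
    rw [t1, t2, hc]
  refine ⟨?_, haltf⟩
  -- pyBranch b a with equal lengths
  rw [pyBranch]
  rw [PySem.List.slice_to a (b := (b.length : Int)) (by positivity)]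
  rw [show ((b.length : Int)).toNat = b.length from by omega]
  rw [if_neg (by rw [← hl, List.take_of_length_le (le_refl _)]; exact hne)]
  rw [slice_neg_from a b.length (by omega) (by omega)]
  rw [if_neg (by
    rw [show a.length - b.length = 0 from by omega, List.drop_zero]
    exact hne)]
  by_cases h3 : PySem.List.pyGet? b 0 ≠ PySem.List.pyGet? a 0 ∨
      PySem.List.pyGet? b (-1) ≠ PySem.List.pyGet? a (-1)
  · rw [if_pos h3]
  · rw [if_neg h3]
    have hcb : pyFindC b a 0 = i := by
      have := pyFindC_eq_gen b a 0 i (by omega) (by omega)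
        (fun k hk => by simpa using (hpre k (by omega) hk).symm)
        (by
          have := hmis hi
          simpa using fun h => this h.symm)
      simpa using this
    simp only [hcb]
    rw [PySem.List.slice_from b (a := (i : Int)) (by positivity)]
    rw [show ((i : Int)).toNat = i from by omega]
    have hnc : -((b.length : Int) - (i : Int)) = -((b.length - i : Nat) : Int) := by
      omega
    rw [hnc, slice_neg_from a (b.length - i) (by omega) (by omega)]
    rw [show a.length - (b.length - i) = i from by omega]
    rw [if_neg (by
      intro hcon
      apply hmis hi
      have t1 : a[i]? = (a.drop i)[0]? := by rw [List.getElem?_drop]; norm_num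
      have t2 : b[i]? = (b.drop i)[0]? := by rw [List.getElem?_drop]; norm_num
      rw [t1, t2, hcon])]

-- ---- altCore on equal inputs, and its length consequences ----
lemma altCore_refl (l : List String) : altCore l l = true := by
  obtain ⟨-, hile, -, hmis⟩ := altPref_spec l l (le_refl _) 0 (by omega)
  have hi : altPref l l 0 = l.length := by
    by_contra h
    exact hmis (by omega) rfl
  rw [altCore]
  simp only [hi, decide_eq_true_eq]
  omega

def slen (x : List String) : Nat := sumLen (x.map String.toList)

lemma slen_append (x y : List String) : slen (x ++ y) = slen x + slen y := by
  simp [slen, sumLen]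

lemma slen_take_drop (x : List String) (k : Nat) : slen x = slen (x.take k) + slen (x.drop k) := by
  conv_lhs => rw [← List.take_append_drop k x]
  rw [slen_append]

lemma slen_drop_le (x : List String) (k : Nat) : slen (x.drop k) ≤ slen x := by
  rw [slen_take_drop x k]; omega

lemma altCore_eq_of_eq_len (a b : List String) (hl : a.length = b.length)
    (ht : altCore a b = true) : a = b := by
  obtain ⟨-, hile, hpre, hmis⟩ := altPref_spec a b (by omega) 0 (by omega)
  rw [altCore_true_iff a b (by omega)] at ht
  have hi : altPref a b 0 = a.length := by
    by_contra h
    apply hmis (by omega)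
    have t1 : a[altPref a b 0]? = (a.drop (altPref a b 0))[0]? := by
      rw [List.getElem?_drop]; norm_num
    have t2 : b[altPref a b 0]? = (b.drop (b.length - a.length + altPref a b 0))[0]? := by
      rw [List.getElem?_drop]; congr 1; omega
    rw [t1, t2, ht]
  have := take_eq_of_pointwise a b (altPref a b 0) (fun k hk => hpre k (by omega) hk)
  rw [hi, List.take_of_length_le (le_refl _), List.take_of_length_le (by omega)] at this
  exact this

lemma altCore_len_lt (a b : List String) (hlt : a.length < b.length)
    (ht : altCore a b = true) : slen a + a.length < slen b + b.length := by
  obtain ⟨-, hile, hpre, -⟩ := altPref_spec a b (by omega) 0 (by omega)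
  set i := altPref a b 0 with hidef
  rw [altCore_true_iff a b (by omega), ← hidef] at ht
  have htake := take_eq_of_pointwise a b i (fun k hk => hpre k (by omega) hk)
  have e1 : slen a = slen (a.take i) + slen (a.drop i) := slen_take_drop a i
  have e2 : slen (a.drop i) = slen (b.drop (b.length - a.length + i)) := by rw [ht]
  have e3 : b.drop (b.length - a.length + i) = (b.drop i).drop (b.length - a.length) := by
    rw [List.drop_drop]; congr 1; omega
  have e4 : slen (b.drop (b.length - a.length + i)) ≤ slen (b.drop i) := by
    rw [e3]; exact slen_drop_le _ _
  have e5 : slen b = slen (b.take i) + slen (b.drop i) := slen_take_drop b i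
  have e6 : slen (a.take i) = slen (b.take i) := by rw [htake]
  omega

-- Str.len bridge
lemma strLen_eq (s : String) : PySem.Str.len s = s.toList.length := by
  simp [PySem.Str.len]

-- alt is false whenever the two strings have equal length but are different
lemma alt_false_of_len_eq (s1 s2 : String) (hne : s1 ≠ s2)
    (hlen : s1.toList.length = s2.toList.length) : areSentencesSimilar_alt s1 s2 = false := by
  rw [areSentencesSimilar_alt]
  simp only [splitS_def]
  have hL1 := splitS_len s1
  have hL2 := splitS_len s2
  rw [Bool.eq_false_iff]
  by_cases hc : (splitS s2).length < (splitS s1).length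
  · rw [if_pos hc]
    intro ht
    have := altCore_len_lt (splitS s2) (splitS s1) hc ht
    simp only [slen] at this
    omega
  · rw [if_neg hc]
    intro ht
    rcases Nat.lt_or_ge (splitS s1).length (splitS s2).length with h | h
    · have := altCore_len_lt (splitS s1) (splitS s2) h ht
      simp only [slen] at this
      omega
    · have heq : (splitS s1).length = (splitS s2).length := by omega
      exact hne (splitS_inj (altCore_eq_of_eq_len _ _ heq ht))

-- ===== VERDICT (by name: the statement is the Claim_ definition above) =====
theorem areSentencesSimilar_spec : Claim_equal_areSentencesSimilar := by
  intro s1 s2 _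
  rw [Spec_areSentencesSimilar, areSentencesSimilar]
  by_cases h1 : s1 = s2
  · rw [if_pos h1]
    subst h1
    rw [areSentencesSimilar_alt]
    simp only [splitS_def]
    rw [if_neg (by omega)]
    exact (altCore_refl _).symm
  · rw [if_neg h1]
    by_cases h2 : PySem.Str.len s1 = PySem.Str.len s2
    · rw [if_pos h2]
      rw [strLen_eq, strLen_eq] at h2
      exact (alt_false_of_len_eq s1 s2 h1 (by exact_mod_cast h2)).symm
    · rw [if_neg h2]
      simp only [splitS_def]
      rw [areSentencesSimilar_alt]
      simp only [splitS_def]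
      by_cases h3 : (splitS s1).length < (splitS s2).length
      · rw [if_pos h3, if_neg (by omega)]
        exact branch_equiv _ _ (splitS_ne_nil s1) h3
      · rw [if_neg h3]
        by_cases h4 : (splitS s2).length < (splitS s1).length
        · rw [if_pos h4]
          exact branch_equiv _ _ (splitS_ne_nil s2) h4
        · rw [if_neg h4]
          have hl : (splitS s1).length = (splitS s2).length := by omega
          have hne : splitS s1 ≠ splitS s2 := fun h => h1 (splitS_inj h)
          obtain ⟨hA, hB⟩ := eqlen_case (splitS s1) (splitS s2) hne hl (splitS_ne_nil s1)
          rw [hA, hB]
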